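-- pv_equiv track=rewrite | github.com/gtkingbuild/Repo-GTKing | ataque.py | parse_credentials
-- ===== SOURCE A (Python) =====
-- def parse_credentials(input_string):
--     if ':' in input_string and not input_string.startswith('http'):
--         return input_string.split(':')
--     elif 'username=' in input_string and 'password=' in input_string:
--         parts = input_string.split('?')[-1].split('&')
--         username = next((p.split('=')[1] for p in parts if p.startswith('username=')), None)
--         password = next((p.split('=')[1] for p in parts if p.startswith('password=')), None)
--         return username, password
--     else:
--         return None, None
-- ===== SOURCE B (Python) =====
-- def parse_credentials(input_string):
--     if ':' in input_string and not input_string.startswith('http'):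
--         return input_string.split(':')
--     elif 'username=' in input_string and 'password=' in input_string:
--         table = {}
--         for p in input_string.split('?')[-1].split('&'):
--             if '=' in p:
--                 fields = p.split('=')
--                 table.setdefault(fields[0], fields[1])
--         return table.get('username'), table.get('password')
--     else:
--         return None, None
-- ===== Notes on version B (the rewrite author's own statement) =====
-- stated objective: alternative
-- what changed: The query-string branch now builds a name->value table in one pass over the parts (first occurrence wins via setdefault) and answers both credentials by two lookups, instead of two separate next()/startswith scans over the parts.
import Mathlib
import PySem

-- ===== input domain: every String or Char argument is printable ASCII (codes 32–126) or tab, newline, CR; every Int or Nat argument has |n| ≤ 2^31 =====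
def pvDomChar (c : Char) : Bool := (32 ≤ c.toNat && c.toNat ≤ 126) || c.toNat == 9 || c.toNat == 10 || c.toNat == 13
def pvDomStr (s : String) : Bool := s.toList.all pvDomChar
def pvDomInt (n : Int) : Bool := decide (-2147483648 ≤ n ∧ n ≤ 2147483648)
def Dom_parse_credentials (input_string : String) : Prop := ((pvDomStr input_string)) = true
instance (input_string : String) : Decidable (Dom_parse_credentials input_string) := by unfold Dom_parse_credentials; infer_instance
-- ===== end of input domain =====

-- B replaces A's two next()/startswith scans of the query parts by one table-building
-- pass (first occurrence wins) plus two lookups; same cost class ("alternative").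

-- ===== PORT A =====
-- p.split('=')  (the separator "=" is non-empty, so split? is never none)
def pvSplitEq (p : String) : List String := (PySem.Str.split? p "=").getD []

-- p.split('=')[1]; in both programs this is only evaluated when '=' occurs in p,
-- so index 1 exists and the default is unreachable
def pvPartVal (p : String) : String := (pvSplitEq p).getD 1 ""

-- input_string.split('?')[-1].split('&') — identical line in A and B;
-- split('?') is never empty, so the [-1] default is unreachable
def pvParts (s : String) : List String :=
  ((PySem.Str.split?
      ((PySem.List.pyGet? ((PySem.Str.split? s "?").getD []) (-1)).getD "") "&").getD [])

def parse_credentials (input_string : String) : List (Option String) :=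
  if PySem.Str.isIn ":" input_string && !PySem.Str.startswith input_string "http" then
    ((PySem.Str.split? input_string ":").getD []).map some
  else if PySem.Str.isIn "username=" input_string && PySem.Str.isIn "password=" input_string then
    let parts := pvParts input_string
    let username := (parts.find? (fun p => PySem.Str.startswith p "username=")).map pvPartVal
    let password := (parts.find? (fun p => PySem.Str.startswith p "password=")).map pvPartVal
    [username, password]
  else
    [none, none]

-- ===== PORT B =====
-- p.split('=')[0]
def pvPartName (p : String) : String := (pvSplitEq p).getD 0 ""

-- the table-building loop: table.setdefault(fields[0], fields[1]) for each p with '=' in p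
def pvTable (parts : List String) : PySem.Dict String String :=
  parts.foldl
    (fun d p => if PySem.Str.isIn "=" p then d.setdefault (pvPartName p) (pvPartVal p) else d)
    PySem.Dict.empty

def parse_credentials_alt (input_string : String) : List (Option String) :=
  if PySem.Str.isIn ":" input_string && !PySem.Str.startswith input_string "http" then
    ((PySem.Str.split? input_string ":").getD []).map some
  else if PySem.Str.isIn "username=" input_string && PySem.Str.isIn "password=" input_string then
    let table := pvTable (pvParts input_string)
    [table.get? "username", table.get? "password"]
  else
    [none, none]

-- ===== PRECONDITION & SPEC =====
def Spec_parse_credentials (input_string : String) (out : List (Option String)) : Prop := out = parse_credentials_alt input_string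
instance (input_string : String) (out : List (Option String)) : Decidable (Spec_parse_credentials input_string out) := by unfold Spec_parse_credentials; infer_instance

-- ===== CLAIM (what is proved, stated in full; the proofs are below) =====
def Claim_equal_parse_credentials : Prop := ∀ (input_string : String), Dom_parse_credentials input_string → Spec_parse_credentials input_string (parse_credentials input_string)

-- ===== LEMMAS AND PROOFS =====

-- splitOn.go flushes the accumulator in front of the rest of its output
lemma pv_go_acc (sep : List Char) (fuel : Nat) :
    ∀ (l cur : List Char) (acc : List (List Char)),
      PySem.Chars.splitOn.go sep fuel l cur acc
        = acc.reverse ++ PySem.Chars.splitOn.go sep fuel l cur [] := by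
  induction fuel with
  | zero =>
    intro l cur acc
    simp [PySem.Chars.splitOn.go]
  | succ fuel ih =>
    intro l cur acc
    cases l with
    | nil => simp [PySem.Chars.splitOn.go]
    | cons c rest =>
      simp only [PySem.Chars.splitOn.go]
      by_cases h : sep.isPrefixOf (c :: rest) = true
      · simp only [h, if_true]
        rw [ih _ _ (cur.reverse :: acc), ih _ _ [cur.reverse]]
        simp
      · simp only [h, Bool.false_eq_true, if_false]
        exact ih _ _ acc

-- the first chunk produced by splitOn.go with sep = ['='] is cur.reverse ++ takeWhile (· ≠ '='),
-- and it is the only chunk iff '=' does not occur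
lemma pv_go_head (fuel : Nat) :
    ∀ (l cur : List Char), l.length ≤ fuel →
      ∃ rest, PySem.Chars.splitOn.go ['='] fuel l cur []
          = (cur.reverse ++ l.takeWhile (· ≠ '=')) :: rest
        ∧ (rest = [] ↔ '=' ∉ l) := by
  induction fuel with
  | zero =>
    intro l cur hl
    have : l = [] := List.length_eq_zero_iff.mp (Nat.le_zero.mp hl)
    subst this
    exact ⟨[], by simp [PySem.Chars.splitOn.go], by simp⟩
  | succ fuel ih =>
    intro l cur hl
    cases l with
    | nil => exact ⟨[], by simp [PySem.Chars.splitOn.go], by simp⟩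
    | cons c rest =>
      simp only [PySem.Chars.splitOn.go]
      by_cases hc : c = '='
      · subst hc
        have hpre : (['='] : List Char).isPrefixOf ('=' :: rest) = true := by
          simp [List.isPrefixOf]
        simp only [hpre, if_true]
        rw [pv_go_acc]
        obtain ⟨r, hr, hiffr⟩ := ih rest [] (by simpa using Nat.succ_le_succ_iff.mp hl)
        refine ⟨PySem.Chars.splitOn.go ['='] fuel (List.drop (['='] : List Char).length ('=' :: rest)) [] [], by simp [List.takeWhile], ?_⟩
        constructor
        · intro h
          simp only [List.length_cons, List.length_nil, Nat.zero_add, List.drop_one,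
            List.tail_cons] at h
          rw [hr] at h
          exact absurd h (by simp)
        · intro h; simp at h
      · have hpre : (['='] : List Char).isPrefixOf (c :: rest) = false := by
          simp [List.isPrefixOf, beq_eq_false_iff_ne, Ne.symm hc]
        simp only [hpre, Bool.false_eq_true, if_false]
        obtain ⟨r, hr, hiff⟩ := ih rest (c :: cur) (by simpa using Nat.succ_le_succ_iff.mp hl)
        refine ⟨r, ?_, ?_⟩
        · rw [hr]; simp [List.takeWhile, hc]
        · rw [hiff]; simp [Ne.symm hc]

-- the first chunk of p.split('=') and whether there is a second one
lemma pv_splitOn_head (l : List Char) :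
    ∃ rest, PySem.Chars.splitOn l ['='] = l.takeWhile (· ≠ '=') :: rest
      ∧ (rest = [] ↔ '=' ∉ l) := by
  obtain ⟨r, hr, hiff⟩ := pv_go_head (l.length + 1) l [] (by omega)
  exact ⟨r, by simpa [PySem.Chars.splitOn] using hr, hiff⟩

-- '=' in p  ↔  '=' ∈ p.toList
lemma pv_isIn_eq (p : String) :
    PySem.Str.isIn "=" p = true ↔ '=' ∈ p.toList := by
  rw [PySem.Str.isIn_iff_infix]
  exact List.singleton_infix_iff '=' p.toList

-- (k ++ ['=']) is a prefix of l  ↔  '=' occurs in l and the part before the first '=' is k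
lemma pv_key_iff (k : List Char) (hk : '=' ∉ k) :
    ∀ l : List Char, (k ++ ['=']) <+: l ↔ ('=' ∈ l ∧ l.takeWhile (· ≠ '=') = k) := by
  induction k with
  | nil =>
    intro l
    cases l with
    | nil => simp
    | cons c r =>
      by_cases hc : c = '='
      · subst hc; simp [List.cons_prefix_cons, List.takeWhile]
      · simp [List.cons_prefix_cons, List.takeWhile, hc, Ne.symm hc]
  | cons a k' ih =>
    have ha : a ≠ '=' := fun h => hk (h ▸ List.mem_cons_self ..)
    have hk' : '=' ∉ k' := fun h => hk (List.mem_cons_of_mem _ h)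
    intro l
    cases l with
    | nil => simp
    | cons c r =>
      by_cases hc : c = a
      · subst hc
        simp only [List.cons_append, List.cons_prefix_cons, true_and, List.mem_cons]
        rw [ih hk' r]
        rw [List.takeWhile_cons_of_pos (by simp [ha])]
        simp [Ne.symm ha]
      · constructor
        · intro h
          rw [List.cons_append, List.cons_prefix_cons] at h
          exact absurd h.1.symm hc
        · rintro ⟨hm, ht⟩
          by_cases he : c = '='
          · subst he
            rw [List.takeWhile_cons_of_neg (by simp)] at ht
            exact absurd ht.symm (by simp)
          · rw [List.takeWhile_cons_of_pos (by simp [he])] at ht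
            simp only [List.cons.injEq] at ht
            exact absurd ht.1 hc

-- the predicate A scans the parts with equals the test B's table answers for key K
lemma pv_pred_eq (K : String) (hk : '=' ∉ K.toList) (p : String) :
    PySem.Str.startswith p (K ++ "=") = (PySem.Str.isIn "=" p && (pvPartName p == K)) := by
  obtain ⟨rest, hsplit, hiff⟩ := pv_splitOn_head p.toList
  have hname : pvPartName p = String.ofList (p.toList.takeWhile (· ≠ '=')) := by
    simp [pvPartName, pvSplitEq, PySem.Str.split?, PySem.Chars.split?, hsplit]
  have htl : (K ++ "=").toList = K.toList ++ ['='] := by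
    rw [String.toList_append]; rfl
  by_cases h : (K.toList ++ ['=']) <+: p.toList
  · have hkey := (pv_key_iff K.toList hk p.toList).mp h
    have hin : PySem.Str.isIn "=" p = true := (pv_isIn_eq p).mpr hkey.1
    have hbeq : (pvPartName p == K) = true := by
      rw [hname, hkey.2, String.ofList_toList]
      simp
    rw [hin, hbeq]
    rw [PySem.Str.startswith_eq]
    simp only [PySem.Chars.startswith, htl, Bool.and_self]
    exact List.isPrefixOf_iff_prefix.mpr h
  · have hno : ¬ ('=' ∈ p.toList ∧ p.toList.takeWhile (· ≠ '=') = K.toList) :=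
      fun hc => h ((pv_key_iff K.toList hk p.toList).mpr hc)
    have hrhs : (PySem.Str.isIn "=" p && (pvPartName p == K)) = false := by
      by_cases hin : '=' ∈ p.toList
      · have hne : (pvPartName p == K) = false := by
          apply beq_false_of_ne
          intro hc
          apply hno
          refine ⟨hin, ?_⟩
          have h2 := congrArg String.toList hc
          rw [hname, String.toList_ofList] at h2
          exact h2
        simp [hne]
      · have h3 : PySem.Str.isIn "=" p = false := by
          cases hb : PySem.Str.isIn "=" p
          · rfl
          · exact absurd ((pv_isIn_eq p).mp hb) hin
        rw [h3, Bool.false_and]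
    rw [hrhs]
    rw [PySem.Str.startswith_eq]
    simp only [PySem.Chars.startswith, htl]
    exact Bool.eq_false_iff.mpr (fun hb => h (List.isPrefixOf_iff_prefix.mp hb))

-- find? only looks at the predicate's values
lemma pv_find?_congr {α : Type} (p q : α → Bool) (h : ∀ a, p a = q a) :
    ∀ l : List α, l.find? p = l.find? q := by
  intro l
  induction l with
  | nil => rfl
  | cons a t ih => simp [List.find?, h a, ih]

-- the table built by B's loop answers key K with the value of the first matching part
lemma pv_table_get (K : String) :
    ∀ (parts : List String) (d : PySem.Dict String String),
      (parts.foldl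
        (fun d p => if PySem.Str.isIn "=" p then d.setdefault (pvPartName p) (pvPartVal p) else d)
        d).get? K
      = (d.get? K).or
          ((parts.find? (fun p => PySem.Str.isIn "=" p && (pvPartName p == K))).map pvPartVal) := by
  intro parts
  induction parts with
  | nil => intro d; simp
  | cons p rest ih =>
    intro d
    simp only [List.foldl_cons]
    by_cases hin : PySem.Str.isIn "=" p = true
    · by_cases hK : (pvPartName p == K) = true
      · rw [List.find?_cons_of_pos (by rw [hin, hK]; rfl)]
        rw [if_pos hin, ih]
        rw [eq_of_beq hK, PySem.Dict.get?_setdefault_self]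
        cases d.get? K <;> simp [Option.or]
      · rw [List.find?_cons_of_neg (by rw [eq_false_of_ne_true hK, Bool.and_false]; exact Bool.false_ne_true)]
        rw [if_pos hin, ih]
        rw [PySem.Dict.get?_setdefault_of_ne _ _ (fun hc => by rw [hc] at hK; simp at hK)]
    · rw [List.find?_cons_of_neg (by rw [eq_false_of_ne_true hin, Bool.false_and]; exact Bool.false_ne_true)]
      rw [if_neg hin, ih]

-- ===== VERDICT (by name: the statement is the Claim_ definition above) =====
theorem parse_credentials_spec : Claim_equal_parse_credentials := by
  intro s _
  unfold Spec_parse_credentials parse_credentials parse_credentials_alt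
  split
  · rfl
  split
  · simp only [pvTable]
    rw [pv_table_get "username" (pvParts s) PySem.Dict.empty,
        pv_table_get "password" (pvParts s) PySem.Dict.empty]
    simp only [PySem.Dict.get?_empty, Option.none_or]
    rw [pv_find?_congr (fun p => PySem.Str.startswith p "username=")
          (fun p => PySem.Str.isIn "=" p && (pvPartName p == "username"))
          (fun a => by
            have h := pv_pred_eq "username" (by decide) a
            rwa [show ("username" ++ "=" : String) = "username=" by decide] at h)
          (pvParts s),
        pv_find?_congr (fun p => PySem.Str.startswith p "password=")
          (fun p => PySem.Str.isIn "=" p && (pvPartName p == "password"))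
          (fun a => by
            have h := pv_pred_eq "password" (by decide) a
            rwa [show ("password" ++ "=" : String) = "password=" by decide] at h)
          (pvParts s)]
  · rfl
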